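-- pv_equiv track=rewrite | github.com/ShubhamAggarwal6105/Zen.py | backtracking_text.py | notInRow
-- ===== SOURCE A (Python) =====
-- def notInRow(arr, row):
--     st = set()
--     for i in range(0, 9):
--         if arr[row][i] in st:
--             return False
--         if arr[row][i] != ' ':
--             st.add(arr[row][i])
--     return True
-- ===== SOURCE B (Python) =====
-- def notInRow(arr, row):
--     vals = [x for x in arr[row][:9] if x != ' ']
--     return all(vals.count(x) == 1 for x in vals)
-- ===== Notes on version B (the rewrite author's own statement) =====
-- stated objective: alternative
-- what changed: B drops A's incremental set with per-element membership test and early return: it materializes the non-blank entries of the first nine cells and decides duplicates by brute-force occurrence counting, requiring every collected value to occur exactly once (all(vals.count(x) == 1)); no set is maintained at all.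
-- outside the precondition, e.g. on notInRow([['1', '2']], 0): A raises IndexError, B returns True
import Mathlib
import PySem

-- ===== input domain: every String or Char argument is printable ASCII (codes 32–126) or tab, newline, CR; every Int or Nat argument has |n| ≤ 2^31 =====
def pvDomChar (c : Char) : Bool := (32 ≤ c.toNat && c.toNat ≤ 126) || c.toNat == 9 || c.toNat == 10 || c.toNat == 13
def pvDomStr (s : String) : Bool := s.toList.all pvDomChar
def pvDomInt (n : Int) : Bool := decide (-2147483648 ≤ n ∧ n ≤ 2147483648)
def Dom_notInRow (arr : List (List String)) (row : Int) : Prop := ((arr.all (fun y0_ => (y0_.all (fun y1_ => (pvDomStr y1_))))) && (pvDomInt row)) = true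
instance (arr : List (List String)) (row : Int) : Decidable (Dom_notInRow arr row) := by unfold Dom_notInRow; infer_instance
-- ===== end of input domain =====

-- B replaces A's incremental set with early exit by brute-force occurrence counting over the
-- materialized non-blank entries (an alternative decomposition; no set is maintained).

-- ===== PORT A =====
-- A's 'for i in range(0, 9)' loop with early returns, over the set st; none from indexing = IndexError (outside Pre_).
def notInRowGo (r : List String) (st : PySem.Set String) : List Int → Bool
  | [] => true
  | i :: rest =>
    match PySem.List.pyGet? r i with
    | none => false
    | some x =>
      if PySem.Set.contains st x then false
      else if x != " " then notInRowGo r (PySem.Set.add st x) rest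
      else notInRowGo r st rest

def notInRow (arr : List (List String)) (row : Int) : Bool :=
  match PySem.List.pyGet? arr row with
  | none => false
  | some r => notInRowGo r PySem.Set.empty (PySem.List.pyRange 0 9 1)

-- ===== PORT B =====
def notInRow_alt (arr : List (List String)) (row : Int) : Bool :=
  match PySem.List.pyGet? arr row with
  | none => false
  | some r =>
    let vals := (PySem.List.slice r none (some 9)).filter (fun x => x != " ")
    vals.all (fun x => PySem.List.count vals x == 1)

-- ===== PRECONDITION & SPEC =====
-- Pre_ excludes exactly the inputs on which A raises IndexError: an out-of-range row index, or a row
-- shorter than 9 whose non-blank entries are all distinct (there the scan runs past the end of the row).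
def Pre_notInRow (arr : List (List String)) (row : Int) : Prop :=
  (PySem.List.pyGet? arr row).isSome = true ∧
  (9 ≤ ((PySem.List.pyGet? arr row).getD []).length ∨
    ¬ (((PySem.List.pyGet? arr row).getD []).filter (fun x => x != " ")).Nodup)
instance (arr : List (List String)) (row : Int) : Decidable (Pre_notInRow arr row) := by
  unfold Pre_notInRow; infer_instance

def pvWitness_notInRow : List (List String) × Int :=
  ([["1", "2", "3", "4", " ", "6", "7", "8", "9"]], 0)

def Spec_notInRow (arr : List (List String)) (row : Int) (out : Bool) : Prop := out = notInRow_alt arr row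
instance (arr : List (List String)) (row : Int) (out : Bool) : Decidable (Spec_notInRow arr row out) := by unfold Spec_notInRow; infer_instance

-- ===== CLAIM (what is proved, stated in full; the proofs are below) =====
def Claim_equal_notInRow : Prop := ∀ (arr : List (List String)) (row : Int), Dom_notInRow arr row → Pre_notInRow arr row → Spec_notInRow arr row (notInRow arr row)


-- ===== LEMMAS AND PROOFS =====

-- proof-only restatement of A's loop as structural recursion over the scanned elements
def elemGo : List String → PySem.Set String → Bool
  | [], _ => true
  | x :: xs, st =>
    if PySem.Set.contains st x then false
    else if x != " " then elemGo xs (PySem.Set.add st x) else elemGo xs st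

lemma set_contains_iff (s : List String) (x : String) :
    PySem.Set.contains s x = true ↔ x ∈ s := by
  simp [PySem.Set.contains]

lemma set_add_of_not_mem {s : List String} {x : String} (h : x ∉ s) :
    PySem.Set.add s x = s ++ [x] := by
  simp only [PySem.Set.add]
  rw [if_neg]
  simp [h]

lemma notInRowGo_eq_elemGo (r : List String) :
    ∀ (n a b : Nat), n = b - a → b ≤ r.length → ∀ st,
      notInRowGo r st (PySem.List.pyRange (a : Int) (b : Int) 1) = elemGo ((r.drop a).take n) st := by
  intro n
  induction n with
  | zero =>
    intro a b hn hb st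
    rw [PySem.List.pyRange_one_eq_nil (by exact_mod_cast Nat.le_of_sub_eq_zero hn.symm)]
    simp [notInRowGo, elemGo]
  | succ k ih =>
    intro a b hn hb st
    have hab : a < b := by omega
    have ha : a < r.length := by omega
    rw [PySem.List.pyRange_one_cons (by exact_mod_cast hab)]
    have hcast : (a : Int) + 1 = ((a + 1 : Nat) : Int) := by push_cast; ring
    have hdrop : (r.drop a).take (k + 1) = r[a] :: (r.drop (a + 1)).take k := by
      rw [← List.getElem_cons_drop ha]; rfl
    rw [hdrop]
    show (match PySem.List.pyGet? r (a : Int) with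
      | none => false
      | some x =>
        if PySem.Set.contains st x then false
        else if x != " " then notInRowGo r (PySem.Set.add st x) (PySem.List.pyRange ((a : Int) + 1) (b : Int) 1)
        else notInRowGo r st (PySem.List.pyRange ((a : Int) + 1) (b : Int) 1)) = _
    rw [PySem.List.pyGet?_natCast, List.getElem?_eq_getElem ha]
    show (if PySem.Set.contains st r[a] then false
      else if r[a] != " " then notInRowGo r (PySem.Set.add st r[a]) (PySem.List.pyRange ((a : Int) + 1) (b : Int) 1)
      else notInRowGo r st (PySem.List.pyRange ((a : Int) + 1) (b : Int) 1))
      = (if PySem.Set.contains st r[a] then false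
      else if r[a] != " " then elemGo ((r.drop (a + 1)).take k) (PySem.Set.add st r[a])
      else elemGo ((r.drop (a + 1)).take k) st)
    rw [hcast]
    by_cases h1 : PySem.Set.contains st r[a] = true
    · rw [if_pos h1, if_pos h1]
    · rw [if_neg h1, if_neg h1]
      by_cases h2 : (r[a] != " ") = true
      · rw [if_pos h2, if_pos h2, ih (a + 1) b (by omega) hb]
      · rw [if_neg h2, if_neg h2, ih (a + 1) b (by omega) hb]

-- characterization of the loop: true iff the non-blank scanned entries are distinct and disjoint from st
lemma elemGo_iff (l : List String) :
    ∀ st : PySem.Set String, " " ∉ st →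
      (elemGo l st = true ↔
        ((l.filter (fun x => x != " ")).Nodup ∧
          ∀ x ∈ l.filter (fun x => x != " "), x ∉ st)) := by
  induction l with
  | nil => intro st _; simp [elemGo]
  | cons x xs ih =>
    intro st hs
    by_cases hb : x = " "
    · subst hb
      have hc : PySem.Set.contains st " " = false := by
        rw [← Bool.not_eq_true, set_contains_iff]; exact hs
      simp only [elemGo, hc, Bool.false_eq_true, if_false, bne_self_eq_false, Bool.false_eq_true,
        if_false]
      rw [List.filter_cons_of_neg (by simp)]
      exact ih st hs
    · rw [List.filter_cons_of_pos (by simp [hb])]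
      by_cases hc : x ∈ st
      · have hc' : PySem.Set.contains st x = true := (set_contains_iff st x).mpr hc
        simp only [elemGo, hc', if_true]
        constructor
        · intro h; cases h
        · rintro ⟨-, hall⟩
          exact absurd hc (hall x (by simp))
      · have hc' : PySem.Set.contains st x = false := by
          rw [← Bool.not_eq_true, set_contains_iff]; exact hc
        have hbx : (x != " ") = true := by simp [hb]
        simp only [elemGo, hc', Bool.false_eq_true, if_false, hbx, if_true]
        rw [set_add_of_not_mem hc]
        have hs' : " " ∉ st ++ [x] := by
          simp [hs, Ne.symm hb]
        rw [ih _ hs']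
        constructor
        · rintro ⟨hnd, hall⟩
          refine ⟨?_, ?_⟩
          · rw [List.nodup_cons]
            exact ⟨fun hx => by simpa using hall x hx, hnd⟩
          · intro y hy
            rcases List.mem_cons.mp hy with rfl | hy'
            · exact hc
            · intro hmem
              exact hall y hy' (by simp [hmem])
        · rintro ⟨hnd, hall⟩
          rw [List.nodup_cons] at hnd
          refine ⟨hnd.2, fun y hy hmem => ?_⟩
          rcases List.mem_append.mp hmem with h' | h'
          · exact hall y (by simp [hy]) h'
          · simp only [List.mem_singleton] at h'
            exact hnd.1 (h' ▸ hy)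

-- B's brute-force counting check decides Nodup
lemma all_count_one_iff (l : List String) :
    (l.all (fun x => PySem.List.count l x == 1) = true) ↔ l.Nodup := by
  simp only [List.all_eq_true, PySem.List.count_eq, beq_iff_eq]
  exact (List.nodup_iff_count_eq_one).symm

-- past-the-end scan: with the row shorter than the index range the loop always ends in false
-- (early duplicate return, or the out-of-range access)
lemma notInRowGo_short (r : List String) {b : Int} (hb : (r.length : Int) < b) :
    ∀ (n a : Nat), n = r.length - a → a ≤ r.length → ∀ st,
      notInRowGo r st (PySem.List.pyRange (a : Int) b 1) = false := by
  intro n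
  induction n with
  | zero =>
    intro a hn ha st
    have hae : a = r.length := by omega
    rw [PySem.List.pyRange_one_cons (by omega : (a : Int) < b)]
    show (match PySem.List.pyGet? r (a : Int) with
      | none => false
      | some x =>
        if PySem.Set.contains st x then false
        else if x != " " then notInRowGo r (PySem.Set.add st x) (PySem.List.pyRange ((a : Int) + 1) b 1)
        else notInRowGo r st (PySem.List.pyRange ((a : Int) + 1) b 1)) = false
    rw [PySem.List.pyGet?_natCast, List.getElem?_eq_none (by omega)]
  | succ k ih =>
    intro a hn ha st
    have hal : a < r.length := by omega
    rw [PySem.List.pyRange_one_cons (by omega : (a : Int) < b)]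
    show (match PySem.List.pyGet? r (a : Int) with
      | none => false
      | some x =>
        if PySem.Set.contains st x then false
        else if x != " " then notInRowGo r (PySem.Set.add st x) (PySem.List.pyRange ((a : Int) + 1) b 1)
        else notInRowGo r st (PySem.List.pyRange ((a : Int) + 1) b 1)) = false
    rw [PySem.List.pyGet?_natCast, List.getElem?_eq_getElem hal]
    have hcast : (a : Int) + 1 = ((a + 1 : Nat) : Int) := by push_cast; ring
    simp only [hcast]
    by_cases h1 : PySem.Set.contains st r[a] = true
    · rw [if_pos h1]
    · rw [if_neg h1]
      by_cases h2 : (r[a] != " ") = true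
      · rw [if_pos h2, ih (a + 1) (by omega) (by omega)]
      · rw [if_neg h2, ih (a + 1) (by omega) (by omega)]

theorem notInRow_spec : Claim_equal_notInRow := by
  intro arr row _ hpre
  obtain ⟨hsome, hside⟩ := hpre
  obtain ⟨r, hr⟩ := Option.isSome_iff_exists.mp hsome
  rw [hr, Option.getD_some] at hside
  unfold Spec_notInRow notInRow notInRow_alt
  rw [hr]
  simp only
  rw [PySem.List.slice_to r (by norm_num)]
  have hto : (9 : Int).toNat = 9 := rfl
  rw [hto]
  by_cases hlen : 9 ≤ r.length
  · -- the row has at least 9 entries: both sides decide Nodup of the non-blank prefix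
    show notInRowGo r PySem.Set.empty (PySem.List.pyRange ((0 : Nat) : Int) ((9 : Nat) : Int) 1) = _
    rw [notInRowGo_eq_elemGo r 9 0 9 rfl hlen PySem.Set.empty]
    simp only [List.drop_zero]
    have h1 := elemGo_iff (r.take 9) PySem.Set.empty (by simp [PySem.Set.empty])
    set vals := (r.take 9).filter (fun x => x != " ") with hv
    rcases Bool.eq_false_or_eq_true (elemGo (r.take 9) PySem.Set.empty) with he | he <;> rw [he] <;> symm
    · rw [all_count_one_iff]
      exact (h1.mp he).1
    · rw [← Bool.not_eq_true, all_count_one_iff]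
      intro hnd
      rw [h1.mpr ⟨hnd, fun x _ => by simp [PySem.Set.empty]⟩] at he
      cases he
  · -- a short row with a duplicate non-blank entry: both sides are false
    have hdup := hside.resolve_left hlen
    have hshort : r.length < 9 := by omega
    show notInRowGo r PySem.Set.empty (PySem.List.pyRange ((0 : Nat) : Int) 9 1) = _
    rw [notInRowGo_short r (by exact_mod_cast hshort) r.length 0 (by omega) (by omega)]
    rw [List.take_of_length_le (by omega)]
    symm
    rw [← Bool.not_eq_true, all_count_one_iff]
    exact hdup
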